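-- pv_equiv track=rewrite | github.com/warmsirius/code-evolution | Backend/Algorithm/zcy_book/ch5/4.robot_walk.py | process
-- ===== SOURCE A (Python) =====
-- def process(N, cur, rest, P):
--     if rest == 0:
--         return 1 if cur == P else 0
--     if cur == 1:
--         return process(N, 2, rest - 1, P)
--     elif cur == N:
--         return process(N, N - 1, rest - 1, P)
--     else:
--         return process(N, cur - 1, rest - 1, P) + process(N, cur + 1, rest - 1, P)
-- ===== SOURCE B (Python) =====
-- def process(N, cur, rest, P):
--     # Forward DP: one dict of position -> number of walks, advanced `rest` steps.
--     dist = {cur: 1}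
--     for _ in range(rest):
--         nxt = {}
--         for pos, c in dist.items():
--             if pos == 1:
--                 nxt[2] = nxt.get(2, 0) + c
--             elif pos == N:
--                 nxt[N - 1] = nxt.get(N - 1, 0) + c
--             else:
--                 nxt[pos - 1] = nxt.get(pos - 1, 0) + c
--                 nxt[pos + 1] = nxt.get(pos + 1, 0) + c
--         dist = nxt
--     return dist.get(P, 0)
-- ===== Notes on version B (the rewrite author's own statement) =====
-- stated objective: faster
-- what changed: Replaced the exponential branching recursion with an iterative forward DP that keeps one dict of position->walk-count and advances it rest steps, reading off the count at P; intended as faster (measured: A timed out at rest=16 where B returned; no clean ratio at sizes both finish).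
import Mathlib
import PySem

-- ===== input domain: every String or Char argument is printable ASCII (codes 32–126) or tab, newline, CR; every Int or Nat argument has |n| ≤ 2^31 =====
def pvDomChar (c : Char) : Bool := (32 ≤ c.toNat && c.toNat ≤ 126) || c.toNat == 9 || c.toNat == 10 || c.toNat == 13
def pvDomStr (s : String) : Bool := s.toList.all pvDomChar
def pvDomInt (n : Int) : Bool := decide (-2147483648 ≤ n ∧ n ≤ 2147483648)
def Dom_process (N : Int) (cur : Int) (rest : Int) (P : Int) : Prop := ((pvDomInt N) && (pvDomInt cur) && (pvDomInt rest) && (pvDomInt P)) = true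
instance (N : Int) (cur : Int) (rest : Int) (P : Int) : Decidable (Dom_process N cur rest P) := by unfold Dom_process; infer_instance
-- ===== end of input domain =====

-- B replaces A's branching recursion (exponential in rest) by an iterative forward DP over
-- one dict of position -> walk count, advanced rest steps. Intended as faster; measured:
-- a timing run saw A time out at n=16 where B returned, but no clean ratio at sizes both finish.

-- ===== PORT A =====
def process (N : Int) (cur : Int) (rest : Int) (P : Int) : Int :=
  if rest = 0 then (if cur = P then 1 else 0)
  else if rest < 0 then 0  -- Python never returns here (unbounded recursion); these inputs are excluded by Pre_
  else if cur = 1 then process N 2 (rest - 1) P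
  else if cur = N then process N (N - 1) (rest - 1) P
  else process N (cur - 1) (rest - 1) P + process N (cur + 1) (rest - 1) P
termination_by rest.toNat
decreasing_by all_goals omega

-- ===== PORT B =====
-- body of the inner `for pos, c in dist.items()` loop of Source B
def pvStep (N : Int) (nd : PySem.Dict Int Int) (p : Int × Int) : PySem.Dict Int Int :=
  if p.1 = 1 then nd.insert 2 (nd.getD 2 0 + p.2)
  else if p.1 = N then nd.insert (N - 1) (nd.getD (N - 1) 0 + p.2)
  else
    let nd1 := nd.insert (p.1 - 1) (nd.getD (p.1 - 1) 0 + p.2)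
    nd1.insert (p.1 + 1) (nd1.getD (p.1 + 1) 0 + p.2)

def process_alt (N : Int) (cur : Int) (rest : Int) (P : Int) : Int :=
  ((PySem.List.pyRange 0 rest 1).foldl
    (fun dist _ => dist.items.foldl (pvStep N) PySem.Dict.empty)
    (PySem.Dict.empty.insert cur 1)).getD P 0

-- ===== PRECONDITION & SPEC =====
-- Pre_ excludes rest < 0, where the Python A recurses without bound (RecursionError).
def Pre_process (N : Int) (cur : Int) (rest : Int) (P : Int) : Prop := 0 ≤ rest
instance (N : Int) (cur : Int) (rest : Int) (P : Int) : Decidable (Pre_process N cur rest P) := by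
  unfold Pre_process; infer_instance
def pvWitness_process : Int × Int × Int × Int := (5, 2, 4, 3)

def Spec_process (N : Int) (cur : Int) (rest : Int) (P : Int) (out : Int) : Prop := out = process_alt N cur rest P
instance (N : Int) (cur : Int) (rest : Int) (P : Int) (out : Int) : Decidable (Spec_process N cur rest P out) := by unfold Spec_process; infer_instance

-- ===== CLAIM (what is proved, stated in full; the proofs are below) =====
def Claim_equal_process : Prop := ∀ (N : Int) (cur : Int) (rest : Int) (P : Int), Dom_process N cur rest P → Pre_process N cur rest P → Spec_process N cur rest P (process N cur rest P)

-- ===== LEMMAS AND PROOFS =====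

-- a map that replaces the (absent) key k is the identity
theorem map_replace_id (l : List (Int×Int)) (k : Int) (v : Int×Int)
    (h : ∀ p ∈ l, p.1 ≠ k) : l.map (fun p => if p.1 == k then v else p) = l := by
  induction l with
  | nil => rfl
  | cons a t ih =>
    simp only [List.map_cons]
    rw [if_neg (by simpa using h a (by simp)), ih (fun p hp => h p (by simp [hp]))]

-- adding c to the (present) key k of an association list adds c * f k to its weighted sum
theorem replace_sum (l : List (Int×Int)) (k w c : Int) (f : Int → Int)
    (hnd : (l.map Prod.fst).Nodup) (hm : (k, w) ∈ l) :
    ((l.map (fun p => if p.1 == k then (k, w + c) else p)).map (fun p => p.2 * f p.1)).sum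
      = (l.map (fun p => p.2 * f p.1)).sum + c * f k := by
  induction l with
  | nil => simp at hm
  | cons a t ih =>
    simp only [List.map_cons, List.nodup_cons] at hnd ⊢
    rcases List.mem_cons.mp hm with h | h
    · subst h
      have hrep : t.map (fun p => if p.1 == k then (k, w + c) else p) = t := by
        apply map_replace_id
        intro p hp hpk
        have := List.mem_map_of_mem (f := Prod.fst) hp
        rw [hpk] at this
        exact hnd.1 this
      simp only [hrep, List.sum_cons, beq_self_eq_true, if_true]
      ring
    · have ha : a.1 ≠ k := by
        rintro rfl
        have := List.mem_map_of_mem (f := Prod.fst) h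
        exact hnd.1 (by simpa using this)
      rw [if_neg (by simpa using ha)]
      simp only [List.sum_cons]
      rw [ih hnd.2 h]
      ring

-- weighted sum of a dict's entries under a position valuation f
def pvSumW (f : Int → Int) (d : PySem.Dict Int Int) : Int :=
  (d.items.map (fun p => p.2 * f p.1)).sum

theorem pvSumW_addTo (f : Int → Int) (d : PySem.Dict Int Int) (hd : d.keys.Nodup)
    (k c : Int) : pvSumW f (d.insert k (d.getD k 0 + c)) = pvSumW f d + c * f k := by
  by_cases h : d.contains k = true
  · obtain ⟨w, hw⟩ : ∃ w, (k, w) ∈ d.items := by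
      have hk : k ∈ d.keys := (PySem.Dict.contains_iff_mem_keys d k).mp h
      simp only [PySem.Dict.keys, List.mem_map] at hk
      obtain ⟨p, hp, hpe⟩ := hk
      exact ⟨p.2, by rwa [show (k, p.2) = p from by cases p; simp_all]⟩
    have hg : d.getD k 0 = w := PySem.Dict.getD_of_mem_items d hw hd 0
    unfold pvSumW
    rw [PySem.Dict.items_insert_of_contains d _ h, hg]
    exact replace_sum d.items k w c f (by simpa [PySem.Dict.keys] using hd) hw
  · unfold pvSumW
    rw [PySem.Dict.items_insert_of_not_contains d _ (by simpa using h),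
        PySem.Dict.getD_of_not_contains d 0 (by simpa using h)]
    simp

theorem pvStep_nodup_one (N : Int) (nd : PySem.Dict Int Int) (p : Int × Int)
    (hnd : nd.keys.Nodup) : (pvStep N nd p).keys.Nodup := by
  unfold pvStep
  split_ifs <;> first
    | exact PySem.Dict.nodup_keys_insert _ _ _ hnd
    | exact PySem.Dict.nodup_keys_insert _ _ _ (PySem.Dict.nodup_keys_insert _ _ _ hnd)

theorem pvStep_nodup (N : Int) (l : List (Int × Int)) (nd : PySem.Dict Int Int)
    (hnd : nd.keys.Nodup) : (l.foldl (pvStep N) nd).keys.Nodup := by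
  induction l generalizing nd with
  | nil => exact hnd
  | cons a t ih => exact ih _ (pvStep_nodup_one N nd a hnd)

theorem pvSumW_step_one (N : Int) (f : Int → Int) (nd : PySem.Dict Int Int)
    (hnd : nd.keys.Nodup) (p : Int × Int) :
    pvSumW f (pvStep N nd p) = pvSumW f nd +
      p.2 * (if p.1 = 1 then f 2 else if p.1 = N then f (N - 1) else f (p.1 - 1) + f (p.1 + 1)) := by
  unfold pvStep
  split_ifs with h1 h2
  · rw [pvSumW_addTo f nd hnd 2 p.2]
  · rw [pvSumW_addTo f nd hnd (N - 1) p.2]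
  · rw [pvSumW_addTo f _ (PySem.Dict.nodup_keys_insert _ _ _ hnd) (p.1 + 1) p.2,
        pvSumW_addTo f nd hnd (p.1 - 1) p.2]
    ring

-- one full DP layer: the weighted sum under f of the new dict is the sum of one-step expansions
theorem pvSumW_step (N : Int) (f g : Int → Int)
    (hg : ∀ pos, g pos = if pos = 1 then f 2 else if pos = N then f (N - 1) else f (pos - 1) + f (pos + 1))
    (l : List (Int × Int)) (nd : PySem.Dict Int Int) (hnd : nd.keys.Nodup) :
    pvSumW f (l.foldl (pvStep N) nd) = pvSumW f nd + (l.map (fun p => p.2 * g p.1)).sum := by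
  induction l generalizing nd with
  | nil => simp
  | cons a t ih =>
    simp only [List.foldl_cons, List.map_cons, List.sum_cons]
    rw [ih _ (pvStep_nodup_one N nd a hnd), pvSumW_step_one N f nd hnd a, hg a.1]
    ring

theorem pick_sum (P : Int) (l : List (Int × Int)) (w : Int)
    (hnd : (l.map Prod.fst).Nodup) (hm : (P, w) ∈ l) :
    (l.map (fun p => p.2 * (if p.1 = P then 1 else 0))).sum = w := by
  induction l with
  | nil => simp at hm
  | cons a t ih =>
    simp only [List.map_cons, List.nodup_cons] at hnd ⊢
    rcases List.mem_cons.mp hm with h | h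
    · subst h
      simp only [List.sum_cons]
      have : ∀ p ∈ t, p.1 ≠ P := by
        intro p hp hpk
        have := List.mem_map_of_mem (f := Prod.fst) hp
        rw [hpk] at this
        exact hnd.1 this
      have hz : (t.map (fun p => p.2 * (if p.1 = P then 1 else 0))).sum = 0 := by
        apply List.sum_eq_zero
        intro x hx
        obtain ⟨p, hp, rfl⟩ := List.mem_map.mp hx
        rw [if_neg (this p hp), mul_zero]
      rw [hz, add_zero]
      simp
    · have ha : a.1 ≠ P := by
        rintro rfl
        have := List.mem_map_of_mem (f := Prod.fst) h
        exact hnd.1 (by simpa using this)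
      simp only [List.sum_cons, if_neg ha, mul_zero, zero_add]
      exact ih hnd.2 h

-- the weighted sum under the indicator of P is exactly dist.get(P, 0)
theorem pvSumW_indicator (P : Int) (d : PySem.Dict Int Int) (hd : d.keys.Nodup) :
    pvSumW (fun pos => if pos = P then 1 else 0) d = d.getD P 0 := by
  by_cases h : d.contains P = true
  · obtain ⟨w, hw⟩ : ∃ w, (P, w) ∈ d.items := by
      have hk : P ∈ d.keys := (PySem.Dict.contains_iff_mem_keys d P).mp h
      simp only [PySem.Dict.keys, List.mem_map] at hk
      obtain ⟨p, hp, hpe⟩ := hk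
      exact ⟨p.2, by rwa [show (P, p.2) = p from by cases p; simp_all]⟩
    rw [PySem.Dict.getD_of_mem_items d hw hd 0]
    exact pick_sum P d.items w (by simpa [PySem.Dict.keys] using hd) hw
  · rw [PySem.Dict.getD_of_not_contains d 0 (by simpa using h)]
    unfold pvSumW
    apply List.sum_eq_zero
    intro x hx
    obtain ⟨p, hp, rfl⟩ := List.mem_map.mp hx
    have hne : p.1 ≠ P := by
      rintro rfl
      have hk : p.1 ∈ d.keys := by
        simp only [PySem.Dict.keys, List.mem_map]
        exact ⟨p, hp, rfl⟩
      exact absurd ((PySem.Dict.contains_iff_mem_keys d p.1).mpr hk) h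
    simp [if_neg hne]

-- unfolding A's recursion one step for a positive remaining count
theorem process_succ (N P k : Int) (hk : 0 ≤ k) (pos : Int) :
    process N pos (k + 1) P = if pos = 1 then process N 2 k P
      else if pos = N then process N (N - 1) k P
      else process N (pos - 1) k P + process N (pos + 1) k P := by
  rw [process]
  simp only [show ¬(k + 1 = 0) from by omega, show ¬(k + 1 < 0) from by omega,
    if_false, add_sub_cancel_right]

theorem pv_iter_nodup (N : Int) (n : Nat) (d : PySem.Dict Int Int) (hd : d.keys.Nodup) :
    ((List.range n).foldl (fun dist _ => dist.items.foldl (pvStep N) PySem.Dict.empty) d).keys.Nodup := by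
  induction n generalizing d with
  | zero => exact hd
  | succ m ih =>
    rw [List.range_succ, List.foldl_append]
    simp only [List.foldl_cons, List.foldl_nil]
    exact pvStep_nodup N _ PySem.Dict.empty PySem.Dict.nodup_keys_empty

-- loop invariant: each DP layer trades one application of the step for one more remaining step of A
theorem pv_loop (N P : Int) (n : Nat) (k : Int) (hk : 0 ≤ k) (d : PySem.Dict Int Int)
    (hd : d.keys.Nodup) :
    pvSumW (fun pos => process N pos k P)
      ((List.range n).foldl (fun dist _ => dist.items.foldl (pvStep N) PySem.Dict.empty) d)
    = pvSumW (fun pos => process N pos (k + n) P) d := by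
  induction n generalizing k d with
  | zero => simp
  | succ m ih =>
    rw [List.range_succ, List.foldl_append]
    simp only [List.foldl_cons, List.foldl_nil]
    set D := (List.range m).foldl (fun dist _ => dist.items.foldl (pvStep N) PySem.Dict.empty) d with hD
    rw [pvSumW_step N (fun pos => process N pos k P) (fun pos => process N pos (k + 1) P)
      (process_succ N P k hk) D.items PySem.Dict.empty PySem.Dict.nodup_keys_empty]
    have hemp : pvSumW (fun pos => process N pos k P) PySem.Dict.empty = 0 := by
      unfold pvSumW
      simp [show (PySem.Dict.empty : PySem.Dict Int Int).items = [] from rfl]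
    rw [hemp, zero_add]
    have : (D.items.map (fun p => p.2 * process N p.1 (k + 1) P)).sum
        = pvSumW (fun pos => process N pos (k + 1) P) D := rfl
    rw [this, ih (k + 1) (by omega) d hd]
    have harg : k + 1 + (m : Int) = k + ((m + 1 : Nat) : Int) := by push_cast; ring
    simp only [harg]

theorem process_eq_alt (N cur rest P : Int) (hpre : 0 ≤ rest) :
    process N cur rest P = process_alt N cur rest P := by
  unfold process_alt
  rw [PySem.List.pyRange_one, List.foldl_map]
  simp only [sub_zero]
  have hd0 : (PySem.Dict.empty.insert cur (1 : Int)).keys.Nodup :=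
    PySem.Dict.nodup_keys_insert _ _ _ PySem.Dict.nodup_keys_empty
  rw [← pvSumW_indicator P _ (pv_iter_nodup N rest.toNat _ hd0)]
  have hf0 : (fun pos => if pos = P then (1 : Int) else 0)
      = (fun pos => process N pos 0 P) := by
    funext pos
    rw [process]
    simp
  rw [hf0, pv_loop N P rest.toNat 0 le_rfl _ hd0]
  have hcast : (0 : Int) + (rest.toNat : Int) = rest := by omega
  simp only [hcast]
  have hitems : (PySem.Dict.empty.insert cur (1 : Int)).items = [(cur, 1)] := by
    rw [PySem.Dict.items_insert_of_not_contains _ _ (by simp)]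
    rfl
  unfold pvSumW
  rw [hitems]
  simp

-- ===== VERDICT (by name: the statement is the Claim_ definition above) =====
theorem process_spec : Claim_equal_process := by
  intro N cur rest P _ hpre
  unfold Spec_process
  exact process_eq_alt N cur rest P hpre
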